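-- pv_equiv track=rewrite | github.com/sdv-dev/RDT | rdt/transformers/id.py | _sample_fallback
-- ===== SOURCE A (Python) =====
-- def _sample_fallback(num_samples, template_samples):
--     """Sample num_samples values such that they are all unique, disregarding the regex."""
--     try:
--         # Integer-based fallback: attempt to convert the last template sample to an integer
--         # and then generate values in a sequential manner.
--         start = int(template_samples[-1]) + 1
--         return [str(i) for i in range(start, start + num_samples)]
--
--     except ValueError:
--         # String-based fallback: if the integer conversion fails, it uses the template
--         # samples as a base and appends a counter to make each value unique.
--         counter = 0
--         samples = []
--         while num_samples > len(samples):
--             samples.extend([f'{i}({counter})' for i in template_samples[:num_samples]])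
--             counter += 1
--
--         return samples[:num_samples]
-- ===== SOURCE B (Python) =====
-- def _sample_fallback(num_samples, template_samples):
--     try:
--         start = int(template_samples[-1]) + 1
--         return [str(start + j) for j in range(num_samples)]
--     except ValueError:
--         block = template_samples[:num_samples]
--         L = len(block)
--         return [f'{block[j % L]}({j // L})' for j in range(num_samples)]
-- ===== Notes on version B (the rewrite author's own statement) =====
-- stated objective: simpler
-- what changed: The string branch's overshoot-and-truncate while loop (repeatedly extending the list by a whole stamped copy of the template block, then slicing) is replaced by a single comprehension that computes each element's template index and counter directly by divmod (block[j % L], j // L); the integer branch is re-decomposed as a range(num_samples) offset comprehension.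
import Mathlib
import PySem

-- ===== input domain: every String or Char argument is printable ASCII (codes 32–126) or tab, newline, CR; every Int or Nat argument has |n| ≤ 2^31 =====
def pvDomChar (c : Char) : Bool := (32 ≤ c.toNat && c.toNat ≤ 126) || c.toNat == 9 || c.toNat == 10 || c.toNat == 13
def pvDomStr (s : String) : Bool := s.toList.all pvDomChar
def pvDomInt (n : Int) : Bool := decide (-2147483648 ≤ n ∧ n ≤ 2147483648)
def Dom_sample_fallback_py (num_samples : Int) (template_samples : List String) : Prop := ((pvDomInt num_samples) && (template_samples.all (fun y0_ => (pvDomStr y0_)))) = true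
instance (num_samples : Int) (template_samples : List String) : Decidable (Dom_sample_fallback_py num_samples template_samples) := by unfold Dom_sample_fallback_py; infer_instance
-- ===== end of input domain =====

-- B replaces A's overshoot-and-truncate while loop by one direct divmod-indexed
-- comprehension (simpler decomposition, same cost); A = B on all non-empty template lists.

-- ===== PORT A =====

-- the f-string f'{s}({c})', exact for any string s and int c (built on List Char)
def pyFStr (s : String) (c : Int) : String :=
  String.ofList (s.toList ++ '(' :: (PySem.Int.toChars c ++ [')']))

-- the while loop of A's string branch; fuel only makes it total (each pass adds ≥ 1
-- element whenever the loop condition holds and the template block is non-empty,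
-- so num_samples.toNat + 1 passes always suffice on inputs admitted by Pre_)
def sfLoopA (template_samples : List String) (num_samples : Int) :
    Nat → Int → List String → List String
  | 0, _, samples => samples
  | fuel + 1, counter, samples =>
    if (samples.length : Int) < num_samples then
      sfLoopA template_samples num_samples fuel (counter + 1)
        (samples ++ (PySem.List.slice template_samples none (some num_samples)).map
          (fun i => pyFStr i counter))
    else samples

def sample_fallback_py (num_samples : Int) (template_samples : List String) : List String :=
  match PySem.List.pyGet? template_samples (-1) with
  | none => []  -- IndexError (template_samples == []): uncaught in Python, excluded by Pre_
  | some last =>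
    match PySem.Int.ofStr? last with
    | some v =>
      let start := v + 1
      (PySem.List.pyRange start (start + num_samples) 1).map PySem.Int.toStr
    | none =>
      PySem.List.slice (sfLoopA template_samples num_samples (num_samples.toNat + 1) 0 []) none (some num_samples)

-- ===== PORT B =====
def sample_fallback_py_alt (num_samples : Int) (template_samples : List String) : List String :=
  match PySem.List.pyGet? template_samples (-1) with
  | none => []  -- IndexError in Source B too; excluded by Pre_
  | some last =>
    match PySem.Int.ofStr? last with
    | some v =>
      let start := v + 1
      (PySem.List.pyRange 0 num_samples 1).map (fun j => PySem.Int.toStr (start + j))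
    | none =>
      let block := PySem.List.slice template_samples none (some num_samples)
      let L : Int := block.length
      -- block[j % L] never raises in Source B (0 ≤ j % L < L whenever the range is
      -- non-empty), so the total pyGetD with a dummy default is exact here
      (PySem.List.pyRange 0 num_samples 1).map
        (fun j => pyFStr (PySem.List.pyGetD block (PySem.Int.mod j L) "") (PySem.Int.floordiv j L))

-- ===== PRECONDITION & SPEC =====
-- Pre_ excludes only the empty template list, on which A raises an uncaught IndexError
def Pre_sample_fallback_py (num_samples : Int) (template_samples : List String) : Prop :=
  template_samples ≠ []
instance (num_samples : Int) (template_samples : List String) : Decidable (Pre_sample_fallback_py num_samples template_samples) := by unfold Pre_sample_fallback_py; infer_instance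

def pvWitness_sample_fallback_py : Int × List String := (3, ["a", "b"])

def Spec_sample_fallback_py (num_samples : Int) (template_samples : List String) (out : List String) : Prop := out = sample_fallback_py_alt num_samples template_samples
instance (num_samples : Int) (template_samples : List String) (out : List String) : Decidable (Spec_sample_fallback_py num_samples template_samples out) := by unfold Spec_sample_fallback_py; infer_instance

-- ===== CLAIM (what is proved, stated in full; the proofs are below) =====
def Claim_equal_sample_fallback_py : Prop := ∀ (num_samples : Int) (template_samples : List String), Dom_sample_fallback_py num_samples template_samples → Pre_sample_fallback_py num_samples template_samples → Spec_sample_fallback_py num_samples template_samples (sample_fallback_py num_samples template_samples)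

-- ===== LEMMAS AND PROOFS =====

-- branch-unfolding lemmas for the two ports
lemma portA_int (n : Int) (ts : List String) (last : String) (v : Int)
    (h1 : PySem.List.pyGet? ts (-1) = some last) (h2 : PySem.Int.ofStr? last = some v) :
    sample_fallback_py n ts = (PySem.List.pyRange (v + 1) (v + 1 + n) 1).map PySem.Int.toStr := by
  unfold sample_fallback_py
  rw [h1]
  change (match PySem.Int.ofStr? last with
    | some v => (PySem.List.pyRange (v + 1) (v + 1 + n) 1).map PySem.Int.toStr
    | none => PySem.List.slice (sfLoopA ts n (n.toNat + 1) 0 []) none (some n)) = _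
  rw [h2]

lemma portA_str (n : Int) (ts : List String) (last : String)
    (h1 : PySem.List.pyGet? ts (-1) = some last) (h2 : PySem.Int.ofStr? last = none) :
    sample_fallback_py n ts =
      PySem.List.slice (sfLoopA ts n (n.toNat + 1) 0 []) none (some n) := by
  unfold sample_fallback_py
  rw [h1]
  change (match PySem.Int.ofStr? last with
    | some v => (PySem.List.pyRange (v + 1) (v + 1 + n) 1).map PySem.Int.toStr
    | none => PySem.List.slice (sfLoopA ts n (n.toNat + 1) 0 []) none (some n)) = _
  rw [h2]

lemma portB_int (n : Int) (ts : List String) (last : String) (v : Int)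
    (h1 : PySem.List.pyGet? ts (-1) = some last) (h2 : PySem.Int.ofStr? last = some v) :
    sample_fallback_py_alt n ts =
      (PySem.List.pyRange 0 n 1).map (fun j => PySem.Int.toStr (v + 1 + j)) := by
  unfold sample_fallback_py_alt
  rw [h1]
  change (match PySem.Int.ofStr? last with
    | some v => (PySem.List.pyRange 0 n 1).map (fun j => PySem.Int.toStr (v + 1 + j))
    | none => (PySem.List.pyRange 0 n 1).map
        (fun j => pyFStr
          (PySem.List.pyGetD (PySem.List.slice ts none (some n))
            (PySem.Int.mod j ((PySem.List.slice ts none (some n)).length : Int)) "")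
          (PySem.Int.floordiv j ((PySem.List.slice ts none (some n)).length : Int)))) = _
  rw [h2]

lemma portB_str (n : Int) (ts : List String) (last : String)
    (h1 : PySem.List.pyGet? ts (-1) = some last) (h2 : PySem.Int.ofStr? last = none) :
    sample_fallback_py_alt n ts =
      (PySem.List.pyRange 0 n 1).map
        (fun j => pyFStr
          (PySem.List.pyGetD (PySem.List.slice ts none (some n))
            (PySem.Int.mod j ((PySem.List.slice ts none (some n)).length : Int)) "")
          (PySem.Int.floordiv j ((PySem.List.slice ts none (some n)).length : Int))) := by
  unfold sample_fallback_py_alt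
  rw [h1]
  change (match PySem.Int.ofStr? last with
    | some v => (PySem.List.pyRange 0 n 1).map (fun j => PySem.Int.toStr (v + 1 + j))
    | none => (PySem.List.pyRange 0 n 1).map
        (fun j => pyFStr
          (PySem.List.pyGetD (PySem.List.slice ts none (some n))
            (PySem.Int.mod j ((PySem.List.slice ts none (some n)).length : Int)) "")
          (PySem.Int.floordiv j ((PySem.List.slice ts none (some n)).length : Int)))) = _
  rw [h2]

-- j-th element of the concatenation of K stamped copies of a non-empty block
lemma getElem?_flat_chunks {α β : Type} (block : List α) (hL : 0 < block.length)
    (F : α → Nat → β) :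
    ∀ (K j : Nat), j < K * block.length →
      ((List.range K).flatMap (fun c => block.map (fun s => F s c)))[j]? =
        some (F (block[j % block.length]'(Nat.mod_lt _ hL)) (j / block.length)) := by
  intro K
  induction K generalizing F with
  | zero => intro j hj; omega
  | succ K ih =>
    intro j hj
    rw [List.range_succ_eq_map, List.flatMap_cons, List.flatMap_map]
    by_cases hjL : j < block.length
    · rw [List.getElem?_append_left (by simpa using hjL)]
      simp [List.getElem?_map, List.getElem?_eq_getElem hjL,
        Nat.mod_eq_of_lt hjL, Nat.div_eq_of_lt hjL]
    · push_neg at hjL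
      rw [List.getElem?_append_right (by simpa using hjL)]
      simp only [List.length_map]
      rw [ih (fun s c => F s (c + 1)) (j - block.length) (by
        have e1 : (K + 1) * block.length = K * block.length + block.length := by ring
        have e2 : K.succ * block.length = K * block.length + block.length := Nat.succ_mul K block.length
        omega)]
      have hmod : (j - block.length) % block.length = j % block.length :=
        (Nat.mod_eq_sub_mod hjL).symm
      have hdiv : (j - block.length) / block.length + 1 = j / block.length :=
        (Nat.div_eq_sub_div hL hjL).symm
      simp only [hmod, hdiv]

lemma take_loopA (template_samples : List String) (num_samples : Int)
    (hL : 0 < (PySem.List.slice template_samples none (some num_samples)).length) :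
    ∀ (fuel : Nat) (counter : Int) (samples : List String),
      num_samples.toNat ≤ samples.length + fuel * (PySem.List.slice template_samples none (some num_samples)).length →
      (sfLoopA template_samples num_samples fuel counter samples).take num_samples.toNat =
        (samples ++ (List.range fuel).flatMap
          (fun c : Nat => (PySem.List.slice template_samples none (some num_samples)).map
            (fun i => pyFStr i (counter + (c : Int))))).take num_samples.toNat := by
  intro fuel
  set block := PySem.List.slice template_samples none (some num_samples) with hblock
  induction fuel with
  | zero =>
    intro counter samples h
    simp [sfLoopA]
  | succ fuel ih =>
    intro counter samples h
    rw [sfLoopA]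
    split
    · rename_i hcond
      have hm : (fuel + 1) * block.length = fuel * block.length + block.length :=
        Nat.succ_mul fuel block.length
      rw [ih (counter + 1) (samples ++ block.map (fun i => pyFStr i counter))
        (by simp only [List.length_append, List.length_map]; omega)]
      rw [List.append_assoc]
      congr 2
      rw [List.range_succ_eq_map, List.flatMap_cons, List.flatMap_map]
      congr 1
      · simp
      · congr 1
        funext c
        congr 1
        funext i
        congr 1
        push_cast
        ring
    · rename_i hcond
      rw [List.take_append_of_le_length]
      omega

theorem sample_fallback_py_spec : Claim_equal_sample_fallback_py := by
  intro n ts _hdom hpre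
  unfold Spec_sample_fallback_py
  cases hget : PySem.List.pyGet? ts (-1) with
  | none =>
    rw [PySem.List.pyGet?_neg_one, List.getLast?_eq_none_iff] at hget
    exact absurd hget hpre
  | some last =>
    cases hof : PySem.Int.ofStr? last with
    | some v =>
      -- integer branch
      rw [portA_int n ts last v hget hof, portB_int n ts last v hget hof]
      simp only [PySem.List.pyRange_one, List.map_map]
      have h1 : (v + 1 + n - (v + 1)) = n - 0 := by ring
      rw [h1]
      congr 1
      funext k
      simp [Function.comp]
    | none =>
      -- string branch
      rw [portA_str n ts last hget hof, portB_str n ts last hget hof]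
      set block := PySem.List.slice ts none (some n) with hblock
      by_cases hn : n ≤ 0
      · have : sfLoopA ts n (n.toNat + 1) 0 [] = [] := by
          rw [sfLoopA]; simp; omega
        rw [this]
        rw [PySem.List.pyRange_one_eq_nil (by omega)]
        simp [PySem.List.slice]
      · push_neg at hn
        have hts : ts ≠ [] := hpre
        have hL : 0 < block.length := by
          rw [hblock, PySem.List.slice_to ts (by omega)]
          simp only [List.length_take]
          have : 0 < ts.length := List.length_pos_iff.mpr hts
          omega
        rw [PySem.List.slice_to _ (by omega : (0:Int) ≤ n)]
        have hfuel : n.toNat + 1 ≤ (n.toNat + 1) * block.length :=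
          Nat.le_mul_of_pos_right _ hL
        rw [take_loopA ts n (by rw [← hblock]; exact hL) (n.toNat + 1) 0 [] (by
          rw [← hblock]; omega)]
        rw [← hblock]
        simp only [List.nil_append]
        -- compare elementwise
        apply List.ext_getElem?
        intro j
        by_cases hj : j < n.toNat
        · rw [List.getElem?_take_of_lt hj]
          rw [getElem?_flat_chunks block hL (fun s c => pyFStr s ((0:Int) + (c:Int)))
            (n.toNat + 1) j (by omega)]
          rw [PySem.List.pyRange_one]
          simp only [List.map_map, List.getElem?_map]
          rw [List.getElem?_range (by omega : j < (n - 0).toNat)]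
          simp only [Option.map_some, Function.comp]
          congr 1
          have hjm : ((0:Int) + (j:Int)) = (j:Int) := by omega
          rw [hjm, PySem.Int.mod_natCast, PySem.Int.floordiv_natCast,
            PySem.List.pyGetD_natCast]
          congr 1
          · rw [List.getD_eq_getElem block "" (Nat.mod_lt _ hL)]
          · omega
        · push_neg at hj
          rw [List.getElem?_eq_none_iff.mpr, List.getElem?_eq_none_iff.mpr]
          · simpa [PySem.List.pyRange_one] using (by omega : (n - 0).toNat ≤ j)
          · simp only [List.length_take]
            omega
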